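-- pv_equiv track=rewrite | github.com/pypi-data/pypi-mirror-343 | packages/me2ai-mcp/me2ai_mcp-0.1.2.tar.gz/me2ai_mcp-0.1.2/tools/team_tools.py | _identify_themes
-- ===== SOURCE A (Python) =====
-- from typing import List, Dict, Any
--
-- def _identify_themes(points: List[tuple]) -> Dict[str, List[str]]:
--     """Group points by common themes."""
--     # In a real implementation, this would use NLP for theme identification
--     themes = {}
--     for point, member in points:
--         theme = point.split()[0].lower()  # Simple theme extraction
--         if theme not in themes:
--             themes[theme] = []
--         themes[theme].append((point, member))
--     return themes
-- ===== SOURCE B (Python) =====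
-- from typing import List, Dict, Any
--
-- def _identify_themes(points: List[tuple]) -> Dict[str, List[str]]:
--     """Group points by common themes (first-occurrence theme order, stable within a theme)."""
--     themes_order = dict.fromkeys(point.split()[0].lower() for point, member in points)
--     return {theme: [(point, member) for point, member in points
--                     if point.split()[0].lower() == theme]
--             for theme in themes_order}
-- ===== Notes on version B (the rewrite author's own statement) =====
-- stated objective: alternative
-- what changed: Replaces A's single-pass dict-building loop (conditional key creation plus append) with a declarative two-phase form: first-occurrence dedup of the theme keys (dict.fromkeys) followed by one filter comprehension per theme.
import Mathlib
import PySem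

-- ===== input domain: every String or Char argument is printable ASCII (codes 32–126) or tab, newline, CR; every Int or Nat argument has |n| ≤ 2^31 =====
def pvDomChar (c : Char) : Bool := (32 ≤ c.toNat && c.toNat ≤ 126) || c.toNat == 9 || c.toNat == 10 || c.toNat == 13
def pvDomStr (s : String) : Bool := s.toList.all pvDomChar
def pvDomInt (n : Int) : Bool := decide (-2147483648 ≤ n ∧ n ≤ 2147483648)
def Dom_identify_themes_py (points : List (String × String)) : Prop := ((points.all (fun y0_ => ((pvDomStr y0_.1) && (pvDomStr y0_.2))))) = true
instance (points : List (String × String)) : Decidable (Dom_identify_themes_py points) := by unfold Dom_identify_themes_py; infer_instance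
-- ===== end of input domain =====

-- B replaces A's single-pass dict-append loop by a dedup of the theme keys followed by one
-- filter pass per theme (objective: alternative decomposition, same results incl. order).

-- theme = point.split()[0].lower() — shared by both Pythons verbatim; pyGet? is none (Python: IndexError)
-- exactly when split() is empty, which Pre_ excludes; the "" default is never reached inside Pre_.
def pvKey (p : String) : String :=
  match PySem.List.pyGet? (PySem.Str.split₀ p) 0 with
  | some w => PySem.Str.lower w
  | none => ""

-- ===== PORT A =====
def identify_themes_py (points : List (String × String)) : List (String × List (String × String)) :=
  (points.foldl
    (fun d pm =>
      let theme := pvKey pm.1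
      let d' := if d.contains theme then d else d.insert theme ([] : List (String × String))
      d'.modify theme [] (fun l => l ++ [pm]))
    PySem.Dict.empty).items

-- ===== PORT B =====
def identify_themes_py_alt (points : List (String × String)) : List (String × List (String × String)) :=
  (PySem.List.dedup (points.map (fun pm => pvKey pm.1))).map
    (fun t => (t, points.filter (fun pm => pvKey pm.1 == t)))

-- ===== PRECONDITION & SPEC =====
-- Pre_ excludes exactly the inputs where Python A raises IndexError: a point whose text is empty
-- or all whitespace (its split() yields no words); Python B raises there too.
def Pre_identify_themes_py (points : List (String × String)) : Prop :=
  ∀ pm ∈ points, PySem.Str.split₀ pm.1 ≠ []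
instance (points : List (String × String)) : Decidable (Pre_identify_themes_py points) := by unfold Pre_identify_themes_py; infer_instance

def pvWitness_identify_themes_py : (List (String × String)) :=
  [("Alpha beta", "m1"), ("alpha gamma", "m2"), ("Other x", "m3")]

def Spec_identify_themes_py (points : List (String × String)) (out : List (String × List (String × String))) : Prop := out = identify_themes_py_alt points
instance (points : List (String × String)) (out : List (String × List (String × String))) : Decidable (Spec_identify_themes_py points out) := by unfold Spec_identify_themes_py; infer_instance

-- ===== CLAIM (what is proved, stated in full; the proofs are below) =====
def Claim_equal_identify_themes_py : Prop := ∀ (points : List (String × String)), Dom_identify_themes_py points → Pre_identify_themes_py points → Spec_identify_themes_py points (identify_themes_py points)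

-- ===== LEMMAS AND PROOFS =====

-- A's loop body (setdefault-to-[] then append) is one Dict.modify.
theorem pv_step_eq (d : PySem.Dict String (List (String × String))) (pm : String × String) :
    (let theme := pvKey pm.1
     let d' := if d.contains theme then d else d.insert theme ([] : List (String × String))
     d'.modify theme [] (fun l => l ++ [pm]))
    = d.modify (pvKey pm.1) [] (fun l => l ++ [pm]) := by
  by_cases h : d.contains (pvKey pm.1)
  · simp [h]
  · have h0 : d.getD (pvKey pm.1) [] = [] :=
      PySem.Dict.getD_of_not_contains _ _ (by simpa using h)
    simp [h, PySem.Dict.modify, PySem.Dict.getD_insert_self, PySem.Dict.insert_insert_self, h0]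

theorem pv_update_nil {l : List String} : PySem.Set.update ([] : List String) l = PySem.List.dedup l := rfl

theorem pv_main (points : List (String × String)) :
    identify_themes_py points = identify_themes_py_alt points := by
  unfold identify_themes_py identify_themes_py_alt
  have hf : (fun (d : PySem.Dict String (List (String × String))) (pm : String × String) =>
      let theme := pvKey pm.1
      let d' := if d.contains theme then d else d.insert theme ([] : List (String × String))
      d'.modify theme [] (fun l => l ++ [pm]))
    = fun d pm => d.modify (pvKey pm.1) [] (fun l => l ++ [pm]) :=
    funext fun d => funext fun pm => pv_step_eq d pm
  rw [hf]
  rw [show points.foldl (fun d pm => d.modify (pvKey pm.1) [] (fun l => l ++ [pm]))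
        (PySem.Dict.empty : PySem.Dict String (List (String × String)))
      = (points.map (fun pm => (pvKey pm.1, pm))).foldl
          (fun d p => d.modify p.1 [] (fun l => l ++ [p.2])) PySem.Dict.empty from
      by rw [List.foldl_map]]
  set q := points.map (fun pm => (pvKey pm.1, pm)) with hq
  have hkeys : (q.foldl (fun d p => d.modify p.1 [] (fun l => l ++ [p.2]))
      (PySem.Dict.empty : PySem.Dict String (List (String × String)))).keys
      = PySem.List.dedup (points.map (fun pm => pvKey pm.1)) := by
    have := PySem.Dict.keys_foldl_modify_key q (fun p => p.1) []
      (fun _ p => fun l => l ++ [p.2]) PySem.Dict.empty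
    simp only [PySem.Dict.keys_empty] at this
    rw [this, pv_update_nil, hq, List.map_map]
    rfl
  have hnd : (q.foldl (fun d p => d.modify p.1 [] (fun l => l ++ [p.2]))
      (PySem.Dict.empty : PySem.Dict String (List (String × String)))).keys.Nodup := by
    exact PySem.Dict.nodup_keys_foldl_modify_key q (fun p => p.1) []
      (fun _ p => fun l => l ++ [p.2]) PySem.Dict.empty (by simp)
  rw [PySem.Dict.items_eq_map_keys _ hnd ([] : List (String × String)), hkeys]
  apply List.map_congr_left
  intro c _
  rw [PySem.Dict.getD_foldl_modify_append q PySem.Dict.empty c]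
  simp [hq, List.filter_map, List.map_map, Function.comp_def]

-- ===== VERDICT (by name: the statement is the Claim_ definition above) =====
theorem identify_themes_py_spec : Claim_equal_identify_themes_py := by
  intro points _ _
  unfold Spec_identify_themes_py
  exact pv_main points
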